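-- pv_equiv track=rewrite | github.com/katryo/subtask_search | app.py | divide_by_count
-- ===== SOURCE A (Python) =====
-- def divide_by_count(items):
--     high_items = []
--     middle_items = []
--     low_items = []
--     for item in items:
--         if item['count'] > 2:
--             high_items.append(item)
--         elif item['count'] == 2:
--             middle_items.append(item)
--         else:
--             low_items.append(item)
--     outputs = []
--     outputs.extend(high_items)
--     outputs.extend(middle_items)
--     outputs.extend(low_items)
--     return outputs
-- ===== SOURCE B (Python) =====
-- def divide_by_count(items):
--     return sorted(items, key=lambda item: 0 if item['count'] > 2 else (1 if item['count'] == 2 else 2))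
-- ===== Notes on version B (the rewrite author's own statement) =====
-- stated objective: idiomatic
-- what changed: Replaces the three-bucket partition-and-concatenate loop with a single stable sorted() call on a 0/1/2 rank key, relying on sort stability to keep input order within each group.
import Mathlib
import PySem

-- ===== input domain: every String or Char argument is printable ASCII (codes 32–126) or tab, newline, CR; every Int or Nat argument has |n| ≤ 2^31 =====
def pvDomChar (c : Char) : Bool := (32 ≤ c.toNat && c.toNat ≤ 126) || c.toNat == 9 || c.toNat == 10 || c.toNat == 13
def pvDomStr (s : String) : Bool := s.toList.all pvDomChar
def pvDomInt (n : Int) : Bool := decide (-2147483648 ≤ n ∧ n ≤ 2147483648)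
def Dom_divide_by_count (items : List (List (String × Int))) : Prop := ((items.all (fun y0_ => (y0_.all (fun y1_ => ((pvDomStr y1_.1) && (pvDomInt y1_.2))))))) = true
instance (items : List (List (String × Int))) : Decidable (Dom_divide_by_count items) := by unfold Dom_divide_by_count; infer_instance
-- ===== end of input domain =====

-- B replaces A's three-bucket partition loop with one stable sort on a 0/1/2 rank key
-- (idiomatic; same return value — neither version mutates its input).


-- item['count']: first-match association-list lookup; the 'none' (KeyError) case is
-- excluded by Pre_divide_by_count, the default 0 is never reached under it.
def pvCount (item : List (String × Int)) : Int :=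
  match item.find? (fun p => p.1 == "count") with
  | some p => p.2
  | none => 0

-- ===== PORT A =====
def pvStepA (acc : List (List (String × Int)) × List (List (String × Int)) × List (List (String × Int)))
    (item : List (String × Int)) :
    List (List (String × Int)) × List (List (String × Int)) × List (List (String × Int)) :=
  if pvCount item > 2 then (acc.1 ++ [item], acc.2.1, acc.2.2)
  else if pvCount item = 2 then (acc.1, acc.2.1 ++ [item], acc.2.2)
  else (acc.1, acc.2.1, acc.2.2 ++ [item])

def divide_by_count (items : List (List (String × Int))) : List (List (String × Int)) :=
  let r := items.foldl pvStepA ([], [], [])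
  r.1 ++ r.2.1 ++ r.2.2

-- ===== PORT B =====
def pvRank (item : List (String × Int)) : Int :=
  if pvCount item > 2 then 0 else if pvCount item = 2 then 1 else 2

def divide_by_count_alt (items : List (List (String × Int))) : List (List (String × Int)) :=
  PySem.List.sorted items pvRank false

-- ===== PRECONDITION & SPEC =====
-- Pre_ excludes exactly the inputs where some item lacks the key "count": there the
-- Python A (and B) raises KeyError and returns nothing.
def Pre_divide_by_count (items : List (List (String × Int))) : Prop :=
  ∀ item ∈ items, ∃ p ∈ item, p.1 = "count"
instance (items : List (List (String × Int))) : Decidable (Pre_divide_by_count items) := by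
  unfold Pre_divide_by_count; infer_instance

def pvWitness_divide_by_count : (List (List (String × Int))) := [[("count", 3)], [("count", 1)], [("count", 2)]]

def Spec_divide_by_count (items : List (List (String × Int))) (out : List (List (String × Int))) : Prop := out = divide_by_count_alt items
instance (items : List (List (String × Int))) (out : List (List (String × Int))) : Decidable (Spec_divide_by_count items out) := by unfold Spec_divide_by_count; infer_instance

-- ===== CLAIM (what is proved, stated in full; the proofs are below) =====
def Claim_equal_divide_by_count : Prop := ∀ (items : List (List (String × Int))), Dom_divide_by_count items → Pre_divide_by_count items → Spec_divide_by_count items (divide_by_count items)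

-- ===== LEMMAS AND PROOFS =====

-- insertBy places x after every element it is not 'before', and before the whole tail r.
theorem pv_insertBy_middle {α : Type} (before : α → α → Bool) (x : α) :
    ∀ (l r : List α), (∀ y ∈ l, before x y = false) → (∀ y ∈ r, before x y = true) →
      PySem.List.insertBy before x (l ++ r) = l ++ x :: r := by
  intro l
  induction l with
  | nil =>
    intro r _ h2
    cases r with
    | nil => simp [PySem.List.insertBy]
    | cons y r' => simp [PySem.List.insertBy, h2 y (by simp)]
  | cons y l' ih =>
    intro r h1 h2
    simp [PySem.List.insertBy, h1 y (by simp), ih r (fun z hz => h1 z (by simp [hz])) h2]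

theorem pv_rank_cases (x : List (String × Int)) : pvRank x = 0 ∨ pvRank x = 1 ∨ pvRank x = 2 := by
  unfold pvRank; split_ifs <;> simp

-- Insertion-sort fold invariant: accumulator stays grouped as rank-0 ++ rank-1 ++ rank-2.
theorem pv_sorted_fold :
    ∀ (xs a0 a1 a2 : List (List (String × Int))),
      (∀ y ∈ a0, pvRank y = 0) → (∀ y ∈ a1, pvRank y = 1) → (∀ y ∈ a2, pvRank y = 2) →
      xs.foldl (fun acc x => PySem.List.insertBy (fun a b => decide (pvRank a < pvRank b)) x acc)
          (a0 ++ a1 ++ a2)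
        = (a0 ++ xs.filter (fun x => pvRank x == 0))
          ++ (a1 ++ xs.filter (fun x => pvRank x == 1))
          ++ (a2 ++ xs.filter (fun x => pvRank x == 2)) := by
  intro xs
  induction xs with
  | nil => intro a0 a1 a2 _ _ _; simp
  | cons x t ih =>
    intro a0 a1 a2 h0 h1 h2
    simp only [List.foldl_cons]
    rcases pv_rank_cases x with hx | hx | hx
    · rw [List.append_assoc a0,
        pv_insertBy_middle _ x a0 (a1 ++ a2)
          (by intro y hy; simp [h0 y hy, hx])
          (by intro y hy; rcases List.mem_append.mp hy with h | h
              · simp [h1 y h, hx]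
              · simp [h2 y h, hx])]
      have : a0 ++ x :: (a1 ++ a2) = (a0 ++ [x]) ++ a1 ++ a2 := by simp
      rw [this, ih (a0 ++ [x]) a1 a2
        (by intro y hy; rcases List.mem_append.mp hy with h | h
            · exact h0 y h
            · simp at h; simpa [h] using hx) h1 h2]
      simp [hx]
    · have e : a0 ++ a1 ++ a2 = (a0 ++ a1) ++ a2 := by simp
      rw [e, pv_insertBy_middle _ x (a0 ++ a1) a2
          (by intro y hy; rcases List.mem_append.mp hy with h | h
              · simp [h0 y h, hx]
              · simp [h1 y h, hx])
          (by intro y hy; simp [h2 y hy, hx])]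
      have e2 : (a0 ++ a1) ++ x :: a2 = a0 ++ (a1 ++ [x]) ++ a2 := by simp
      rw [e2, ih a0 (a1 ++ [x]) a2 h0
        (by intro y hy; rcases List.mem_append.mp hy with h | h
            · exact h1 y h
            · simp at h; simpa [h] using hx) h2]
      simp [hx]
    · have e : a0 ++ a1 ++ a2 = (a0 ++ a1 ++ a2) ++ [] := by simp
      rw [e, pv_insertBy_middle _ x (a0 ++ a1 ++ a2) []
          (by intro y hy
              rcases List.mem_append.mp hy with h | h
              · rcases List.mem_append.mp h with h' | h'
                · simp [h0 y h', hx]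
                · simp [h1 y h', hx]
              · simp [h2 y h, hx])
          (by intro y hy; simp at hy)]
      have e2 : (a0 ++ a1 ++ a2) ++ x :: [] = a0 ++ a1 ++ (a2 ++ [x]) := by simp
      rw [e2, ih a0 a1 (a2 ++ [x]) h0 h1
        (by intro y hy; rcases List.mem_append.mp hy with h | h
            · exact h2 y h
            · simp at h; simpa [h] using hx)]
      simp [hx]

theorem pv_foldA :
    ∀ (xs : List (List (String × Int))) (h m l : List (List (String × Int))),
      xs.foldl pvStepA (h, m, l)
        = (h ++ xs.filter (fun x => pvRank x == 0),
           m ++ xs.filter (fun x => pvRank x == 1),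
           l ++ xs.filter (fun x => pvRank x == 2)) := by
  intro xs
  induction xs with
  | nil => intro h m l; simp
  | cons x t ih =>
    intro h m l
    simp only [List.foldl_cons]
    by_cases hgt : pvCount x > 2
    · have hr : pvRank x = 0 := by simp [pvRank, hgt]
      simp [pvStepA, hgt, ih, hr]
    · by_cases heq : pvCount x = 2
      · have hr : pvRank x = 1 := by simp [pvRank, heq]
        simp [pvStepA, heq, ih, hr]
      · have hr : pvRank x = 2 := by unfold pvRank; rw [if_neg hgt, if_neg heq]
        simp [pvStepA, hgt, heq, ih, hr]

-- ===== VERDICT (by name: the statement is the Claim_ definition above) =====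
theorem divide_by_count_spec : Claim_equal_divide_by_count := by
  intro items _ _
  unfold Spec_divide_by_count divide_by_count divide_by_count_alt
  rw [PySem.List.sorted_eq_foldl_insertBy]
  have hs := pv_sorted_fold items [] [] [] (by simp) (by simp) (by simp)
  simp only [List.nil_append] at hs
  rw [hs, pv_foldA items [] [] []]
  simp
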